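-- pv_equiv track=rewrite | github.com/tjarnikova/AMOC-PLANKTOM | extraction-scripts/transporter.py | get_atlantic
-- ===== SOURCE A (Python) =====
-- def get_atlantic(array, row_index, target_index = 130):
--     row = array[row_index]
--     if row[target_index] != 1:
--         return None, None
--
--     # Find the start of the segment of 0s
--     start_index = target_index
--     while start_index > 0 and row[start_index - 1] == 1:
--         start_index -= 1
--
--     # Find the end of the segment of 0s
--     end_index = target_index
--     while end_index < len(row) - 1 and row[end_index + 1] == 1:
--         end_index += 1
--
--     if row_index in [91,92]:
--         start_index = 93
--
--     return start_index, end_index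
-- ===== SOURCE B (Python) =====
-- def get_atlantic(array, row_index, target_index=130):
--     # Index-based strategy: list all non-1 positions ("breaks") once, then read
--     # the run boundaries straight off the nearest breaks around target_index.
--     row = array[row_index]
--     if row[target_index] != 1:
--         return None, None
--     breaks = [i for i, v in enumerate(row) if v != 1]
--     below = [b for b in breaks if b < target_index]
--     above = [b for b in breaks if b > target_index]
--     start_index = below[-1] + 1 if below else 0
--     end_index = above[0] - 1 if above else len(row) - 1
--     if row_index in [91, 92]:
--         start_index = 93
--     return start_index, end_index
-- ===== Notes on version B (the rewrite author's own statement) =====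
-- stated objective: alternative
-- what changed: Replaces A's two outward-expanding while-scans from the target with a break-index strategy: list all non-1 positions once, then read the run's start/end directly off the nearest break below/above the target (with 0 / len-1 defaults), keeping the [91,92] override.
-- outside the precondition, e.g. on get_atlantic([[1, 1]], 0, -1): A returns (-1, 1), B returns (0, 1)
import Mathlib
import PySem

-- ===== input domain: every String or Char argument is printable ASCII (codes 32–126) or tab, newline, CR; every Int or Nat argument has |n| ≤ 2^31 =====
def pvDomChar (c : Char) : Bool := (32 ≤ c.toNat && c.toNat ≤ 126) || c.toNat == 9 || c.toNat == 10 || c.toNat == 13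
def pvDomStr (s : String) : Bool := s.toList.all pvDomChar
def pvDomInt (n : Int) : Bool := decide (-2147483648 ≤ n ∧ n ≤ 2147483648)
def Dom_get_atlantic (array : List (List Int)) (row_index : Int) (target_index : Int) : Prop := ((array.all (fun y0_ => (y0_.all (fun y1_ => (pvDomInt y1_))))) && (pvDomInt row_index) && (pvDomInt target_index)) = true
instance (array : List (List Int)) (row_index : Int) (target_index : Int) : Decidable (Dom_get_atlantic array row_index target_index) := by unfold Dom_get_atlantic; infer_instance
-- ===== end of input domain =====

-- B replaces A's two outward-expanding scans with a break-position index (alternative decomposition, same cost).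

-- ===== PORT A =====
-- while start_index > 0 and row[start_index - 1] == 1: start_index -= 1
-- (inside the loop 0 ≤ s-1 < len row under Pre_, so getD is exact there)
def findStartA (row : List Int) : Nat → Nat
  | 0 => 0
  | s + 1 => if row.getD s 2 = 1 then findStartA row s else s + 1

-- while end_index < len(row) - 1 and row[end_index + 1] == 1: end_index += 1
-- (fuel-indexed; fuel = len row always suffices under Pre_)
def findEndA (row : List Int) : Nat → Nat → Nat
  | e, 0 => e
  | e, f + 1 => if e + 1 < row.length ∧ row.getD (e + 1) 2 = 1 then findEndA row (e + 1) f else e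

def get_atlantic (array : List (List Int)) (row_index : Int) (target_index : Int) : Option Int × Option Int :=
  match PySem.List.pyGet? array row_index with
  | none => (none, none)   -- IndexError in Python; excluded by Pre_
  | some row =>
    match PySem.List.pyGet? row target_index with
    | none => (none, none) -- IndexError in Python; excluded by Pre_
    | some v =>
      if v ≠ 1 then (none, none)
      else
        -- target_index ≥ 0 under Pre_, so toNat is exact
        let t := target_index.toNat
        let s := findStartA row t
        let e := findEndA row t row.length
        let s' : Int := if row_index = 91 ∨ row_index = 92 then 93 else (s : Int)
        (some s', some (e : Int))

-- ===== PORT B =====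
def get_atlantic_alt (array : List (List Int)) (row_index : Int) (target_index : Int) : Option Int × Option Int :=
  match PySem.List.pyGet? array row_index with
  | none => (none, none)
  | some row =>
    match PySem.List.pyGet? row target_index with
    | none => (none, none)
    | some v =>
      if v ≠ 1 then (none, none)
      else
        let breaks := ((PySem.List.enumerate row 0).filter (fun p => p.2 ≠ 1)).map Prod.fst
        let below := breaks.filter (fun b => b < target_index)
        let above := breaks.filter (fun b => target_index < b)
        let start_index : Int := match below.getLast? with | some b => b + 1 | none => 0
        let end_index : Int := match above.head? with | some b => b - 1 | none => (row.length : Int) - 1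
        let start_index := if row_index = 91 ∨ row_index = 92 then 93 else start_index
        (some start_index, some end_index)

-- ===== PRECONDITION & SPEC =====
-- Pre_ excludes out-of-range indices (where A raises IndexError) and a negative target_index
-- pointing at a 1 — outside the natural domain of column indices, where A's outward scan
-- mixes wrapped and direct indexing.
def Pre_get_atlantic (array : List (List Int)) (row_index : Int) (target_index : Int) : Prop :=
  PySem.Raise.InRange array.length row_index ∧
    PySem.Raise.InRange ((PySem.List.pyGet? array row_index).getD []).length target_index ∧
    (0 ≤ target_index ∨
      PySem.List.pyGet? ((PySem.List.pyGet? array row_index).getD []) target_index ≠ some 1)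
instance (array : List (List Int)) (row_index : Int) (target_index : Int) : Decidable (Pre_get_atlantic array row_index target_index) := by unfold Pre_get_atlantic; infer_instance

def pvWitness_get_atlantic : List (List Int) × Int × Int := ([[0, 1, 1, 1, 0]], 0, 2)

def Spec_get_atlantic (array : List (List Int)) (row_index : Int) (target_index : Int) (out : Option Int × Option Int) : Prop := out = get_atlantic_alt array row_index target_index
instance (array : List (List Int)) (row_index : Int) (target_index : Int) (out : Option Int × Option Int) : Decidable (Spec_get_atlantic array row_index target_index out) := by unfold Spec_get_atlantic; infer_instance

-- ===== CLAIM (what is proved, stated in full; the proofs are below) =====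
def Claim_equal_get_atlantic : Prop := ∀ (array : List (List Int)) (row_index : Int) (target_index : Int), Dom_get_atlantic array row_index target_index → Pre_get_atlantic array row_index target_index → Spec_get_atlantic array row_index target_index (get_atlantic array row_index target_index)

-- ===== LEMMAS AND PROOFS =====

lemma lastFilterLt (l : List Int) (t : Int) (hs : l.Pairwise (· < ·)) (ht : t ∈ l) :
    (l.filter (fun b => b < t + 1)).getLast? = some t := by
  induction l with
  | nil => cases ht
  | cons x xs ih =>
    have hx : ∀ y ∈ xs, x < y := (List.pairwise_cons.mp hs).1
    rw [List.filter_cons]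
    rcases List.mem_cons.mp ht with h | h
    · rw [h]
      have hdec : decide ((x : Int) < x + 1) = true := by simp
      rw [hdec, if_pos rfl]
      have hnil : xs.filter (fun b => decide (b < x + 1)) = [] :=
        List.filter_eq_nil_iff.mpr (fun y hy => by have := hx y hy; simp; omega)
      rw [hnil]
      rfl
    · have hxt : x < t := hx t h
      have ihh := ih (List.pairwise_cons.mp hs).2 h
      have hdec : decide (x < t + 1) = true := by simp; omega
      rw [hdec, if_pos rfl, List.getLast?_cons, ihh]
      simp

lemma headFilterGt (l : List Int) (t : Int) (hs : l.Pairwise (· < ·)) (ht : t + 1 ∈ l) :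
    (l.filter (fun b => t < b)).head? = some (t + 1) := by
  induction l with
  | nil => cases ht
  | cons x xs ih =>
    have hx : ∀ y ∈ xs, x < y := (List.pairwise_cons.mp hs).1
    rw [List.filter_cons]
    rcases List.mem_cons.mp ht with h | h
    · rw [← h]
      have hdec : decide (t < t + 1) = true := by simp
      rw [hdec, if_pos rfl]; simp
    · have hlt : x < t + 1 := hx _ h
      have hdec : decide (t < x) = false := by simp; omega
      rw [hdec, if_neg (by simp)]
      exact ih (List.pairwise_cons.mp hs).2 h

def brkOf (row : List Int) : List Int :=
  ((PySem.List.enumerate row 0).filter (fun p => p.2 ≠ 1)).map Prod.fst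

def startOf (brk : List Int) (T : Int) : Int :=
  match (brk.filter (fun b => b < T)).getLast? with | some b => b + 1 | none => 0

def endOf (brk : List Int) (T : Int) (len : Nat) : Int :=
  match (brk.filter (fun b => T < b)).head? with | some b => b - 1 | none => (len : Int) - 1

lemma mem_brkOf (row : List Int) (x : Int) :
    x ∈ brkOf row ↔ ∃ (k : Nat) (h : k < row.length), x = (k : Int) ∧ row[k] ≠ 1 := by
  simp [brkOf, List.mem_filter, PySem.List.mem_enumerate_iff]

lemma pairwise_brkOf2 (row : List Int) : (brkOf row).Pairwise (· < ·) := by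
  have h := PySem.List.pairwise_lt_enumerate (xs := row) (s := 0)
  exact List.pairwise_map.mpr (List.Pairwise.sublist List.filter_sublist h)

lemma mem_brk_of_break (row : List Int) (k : Nat) (hk : k < row.length) (hv : row.getD k 2 ≠ 1) :
    (k : Int) ∈ brkOf row := by
  rw [mem_brkOf]
  exact ⟨k, hk, rfl, by rwa [List.getD_eq_getElem row 2 hk] at hv⟩

lemma not_mem_brk_of_one (row : List Int) (k : Nat) (hk : k < row.length) (hv : row.getD k 2 = 1) :
    (k : Int) ∉ brkOf row := by
  rw [mem_brkOf]
  rintro ⟨j, hj, hje, hne⟩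
  have : j = k := by omega
  subst this
  rw [List.getD_eq_getElem row 2 hk] at hv
  exact hne hv

lemma startLoop (row : List Int) : ∀ t : Nat, t ≤ row.length →
    (findStartA row t : Int) = startOf (brkOf row) (t : Int) := by
  intro t
  induction t with
  | zero =>
    intro _
    have hnil : (brkOf row).filter (fun b => b < ((0:Nat) : Int)) = [] := by
      apply List.filter_eq_nil_iff.mpr
      intro y hy
      rw [mem_brkOf] at hy
      obtain ⟨k, _, hke, _⟩ := hy
      simp; omega
    simp only [findStartA, Nat.cast_zero]
    unfold startOf
    rw [show ((0:Nat):Int) = 0 from rfl] at hnil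
    rw [hnil]
    rfl
  | succ t ih =>
    intro hle
    have htlen : t < row.length := by omega
    rw [findStartA]
    by_cases h1 : row.getD t 2 = 1
    · rw [if_pos h1, ih (by omega)]
      unfold startOf
      have hnm := not_mem_brk_of_one row t htlen h1
      have : (brkOf row).filter (fun b => b < ((t+1:Nat) : Int)) =
             (brkOf row).filter (fun b => b < ((t:Nat) : Int)) := by
        apply List.filter_congr
        intro x hx
        have hxt : x ≠ (t : Int) := fun he => hnm (he ▸ hx)
        simp only [decide_eq_decide]
        push_cast
        omega
      rw [this]
    · rw [if_neg h1]
      have hmem := mem_brk_of_break row t htlen h1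
      have := lastFilterLt (brkOf row) (t : Int) (pairwise_brkOf2 row) hmem
      unfold startOf
      have hpred : ((brkOf row).filter (fun b => b < ((t+1:Nat) : Int))) =
                   ((brkOf row).filter (fun b => b < (t : Int) + 1)) := by
        push_cast; rfl
      rw [hpred, this]
      push_cast; ring

lemma endLoop (row : List Int) : ∀ (f t : Nat), t < row.length → row.length ≤ t + f + 1 →
    (findEndA row t f : Int) = endOf (brkOf row) (t : Int) row.length := by
  intro f
  induction f with
  | zero =>
    intro t hlt hge
    have ht : t = row.length - 1 := by omega
    rw [findEndA]
    have hnil : (brkOf row).filter (fun b => (t : Int) < b) = [] := by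
      apply List.filter_eq_nil_iff.mpr
      intro y hy
      rw [mem_brkOf] at hy
      obtain ⟨k, hk, hke, _⟩ := hy
      simp; omega
    unfold endOf
    rw [hnil]
    simp; omega
  | succ f ih =>
    intro t hlt hge
    rw [findEndA]
    by_cases hc : t + 1 < row.length ∧ row.getD (t + 1) 2 = 1
    · rw [if_pos hc]
      obtain ⟨hl1, hv1⟩ := hc
      rw [ih (t+1) hl1 (by omega)]
      unfold endOf
      have hnm := not_mem_brk_of_one row (t+1) hl1 hv1
      have : (brkOf row).filter (fun b => ((t:Nat) : Int) < b) =
             (brkOf row).filter (fun b => ((t+1:Nat) : Int) < b) := by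
        apply List.filter_congr
        intro x hx
        have hxt : x ≠ ((t+1:Nat) : Int) := fun he => hnm (he ▸ hx)
        simp only [decide_eq_decide]
        push_cast at hxt ⊢
        omega
      rw [this]
    · rw [if_neg hc]
      by_cases hl1 : t + 1 < row.length
      · have hv1 : row.getD (t + 1) 2 ≠ 1 := fun h => hc ⟨hl1, h⟩
        have hmem := mem_brk_of_break row (t + 1) hl1 hv1
        have hmem' : (t : Int) + 1 ∈ brkOf row := by push_cast at hmem; exact hmem
        have hh := headFilterGt (brkOf row) (t : Int) (pairwise_brkOf2 row) hmem'
        unfold endOf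
        rw [hh]
        push_cast; ring
      · have hnil : (brkOf row).filter (fun b => (t : Int) < b) = [] := by
          apply List.filter_eq_nil_iff.mpr
          intro y hy
          rw [mem_brkOf] at hy
          obtain ⟨k, hk, hke, _⟩ := hy
          simp; omega
        unfold endOf
        rw [hnil]
        simp; omega

-- ===== VERDICT (by name: the statement is the Claim_ definition above) =====
theorem get_atlantic_spec : Claim_equal_get_atlantic := by
  intro array ri ti _ hpre
  obtain ⟨hin, hinT, hd⟩ := hpre
  unfold Spec_get_atlantic get_atlantic get_atlantic_alt
  cases hrow : PySem.List.pyGet? array ri with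
  | none => rfl
  | some row =>
    rw [hrow] at hinT hd
    simp only [Option.getD_some] at hinT hd
    cases hv : PySem.List.pyGet? row ti with
    | none =>
      rw [PySem.List.pyGet?_eq_none_iff] at hv
      exact absurd hinT hv
    | some v =>
    simp only [hv]
    by_cases h1 : v = 1
    · have hti0 : 0 ≤ ti := by
        rcases hd with h | h
        · exact h
        · rw [hv, h1] at h; exact absurd rfl h
      have htilt : ti < (row.length : Int) := hinT.2
      have hvv : v = row[ti.toNat] := by
        have h2 := PySem.List.pyGet?_eq_some_getElem row hti0 htilt
        rw [hv] at h2
        exact Option.some_inj.mp h2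
      rw [hvv] at h1 ⊢
      have hne : ¬(row[ti.toNat] ≠ 1) := by simp [h1]
      rw [if_neg hne, if_neg hne]
      have htn : ((ti.toNat : Nat) : Int) = ti := Int.toNat_of_nonneg hti0
      have htlen : ti.toNat < row.length := by omega
      have hs := startLoop row ti.toNat (Nat.le_of_lt htlen)
      have he := endLoop row row.length ti.toNat htlen (by omega)
      rw [htn] at hs he
      simp only [hs, he]
      unfold startOf endOf brkOf
      rfl
    · rw [if_pos h1, if_pos h1]
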